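-- pv_equiv track=rewrite | github.com/kevinng/everybase | processor/libraries/utils.py | get_this_word
-- ===== SOURCE A (Python) =====
-- def is_space(c):
--     """Returns True if c is a space.
--
--     Returns False otherwise.
--
--     A space may be a ' ' or '\\t' or '\\n'.
--
--     Last updated/tested: 29 April 2021, 8:51 PM
--
--     Parameters
--     ----------
--     c
--         Character to test
--     """
--
--     return c is ' ' or c is '\t' or c is '\n'
--
-- def get_this_word(text, pos):
--     """If text[pos] points to a character of a word (i.e., a string separated
--     from the strings on its left and right by a space), return the word.
--
--     The word, along with its start and end positions are returned in a tuple in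
--     the format:
--
--     (string, start_pos, end_pos)
--
--     A space may be a ' ', '\\n', '\\t' or end of text.
--
--     If text[pos] is a space or text is of length 0, return None.
--
--     E.g., 'aaa bbb ccc'. If points to 'bbb', return 'bbb'. If points to 'aaa',
--     return 'aaa'. If points to 'ccc', return 'ccc'.
--
--     Last updated/tested: 28 April 2021, 11:00 PM
--
--     Parameters
--     ----------
--     text
--         Text to parse
--     pos
--         Position within text to return a continuous string of text around
--     """
--
--     if len(text) == 0 or pos >= len(text) or pos < 0 or is_space(text[pos]):
--         return None
--
--     string = ''
--     start_pos = pos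
--     end_pos = -1
--
--     # Get non-space text before pos
--     for i in reversed(range(0, pos)):
--         c = text[i]
--         if not is_space(c):
--             string = c + string
--             start_pos = i
--         else:
--             break
--
--     # Get non-space text at and after pos
--     for i in range(pos, len(text)):
--         c = text[i]
--         if not is_space(c):
--             string += c
--         else:
--             break
--
--     end_pos = start_pos + len(string)
--
--     return (string, start_pos, end_pos)
-- ===== SOURCE B (Python) =====
-- def get_this_word(text, pos):
--     """Return the whitespace-delimited word covering text[pos] as
--     (word, start, end), or None if pos is out of range / on a space.
--
--     One left-to-right pass over the maximal non-space runs of the whole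
--     text, selecting the run whose span covers pos."""
--     if len(text) == 0 or pos >= len(text) or pos < 0 or text[pos] in ' \t\n':
--         return None
--     n = len(text)
--     i = 0
--     while i < n:
--         if text[i] in ' \t\n':
--             i += 1
--             continue
--         j = i
--         while j < n and text[j] not in ' \t\n':
--             j += 1
--         if i <= pos < j:
--             return (text[i:j], i, j)
--         i = j
--     return None
-- ===== Notes on version B (the rewrite author's own statement) =====
-- stated objective: alternative
-- what changed: Replaces A's bidirectional expansion outward from pos (a reversed scan left plus a forward scan right, building the word by repeated one-character string concatenation) with a single left-to-right sweep that enumerates the maximal non-space runs of the text and returns, via one slice, the run whose half-open span covers pos.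
import Mathlib
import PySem

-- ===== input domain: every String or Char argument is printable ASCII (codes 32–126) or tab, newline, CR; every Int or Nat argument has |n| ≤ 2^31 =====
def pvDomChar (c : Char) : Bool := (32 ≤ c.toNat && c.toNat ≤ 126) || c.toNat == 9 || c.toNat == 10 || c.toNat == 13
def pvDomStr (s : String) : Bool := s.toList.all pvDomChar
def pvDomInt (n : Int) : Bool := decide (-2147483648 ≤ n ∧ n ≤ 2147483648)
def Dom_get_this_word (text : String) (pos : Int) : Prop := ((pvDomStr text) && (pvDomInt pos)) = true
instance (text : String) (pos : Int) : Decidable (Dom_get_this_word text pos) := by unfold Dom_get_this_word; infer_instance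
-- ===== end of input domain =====

-- B replaces A's bidirectional expansion around pos with one left-to-right sweep over the
-- maximal non-space runs of the whole text, returning the run covering pos (objective: alternative).

-- ===== PORT A =====
def isSpaceA (c : Char) : Bool := c == ' ' || c == '\t' || c == '\n'

-- for i in reversed(range(0, pos)): prepend non-space chars, record start_pos, break on space
def backScan (cs : List Char) : Nat → List Char → Nat → (List Char × Nat)
  | 0, s, sp => (s, sp)
  | i+1, s, sp =>
    let c := cs.getD i ' '
    if ¬ isSpaceA c then backScan cs i (c :: s) i else (s, sp)

-- for i in range(pos, len(text)): append non-space chars, break on space (over cs.drop pos)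
def fwdScan : List Char → List Char → List Char
  | [], s => s
  | c :: rest, s => if ¬ isSpaceA c then fwdScan rest (s ++ [c]) else s

def get_this_word (text : String) (pos : Int) : Option (String × Int × Int) :=
  let cs := text.toList
  if cs.length = 0 ∨ pos ≥ (cs.length : Int) ∨ pos < 0 then none
  else
    let p := pos.toNat
    if isSpaceA (cs.getD p ' ') then none
    else
      let bs := backScan cs p [] p
      let s := fwdScan (cs.drop p) bs.1
      some (String.mk s, (bs.2 : Int), (bs.2 : Int) + (s.length : Int))

-- ===== PORT B =====
def isSpaceB (c : Char) : Bool := c == ' ' || c == '\t' || c == '\n'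

-- one sweep over the runs; the inner `while j < n and text[j] not in ' \t\n'` run scan is
-- ported as takeWhile/dropWhile over the same characters
def scanRuns (pos : Int) : List Char → Nat → Option (String × Int × Int)
  | [], _ => none
  | c :: rest, i =>
    if h : isSpaceB c then scanRuns pos rest (i+1)
    else
      let w := List.takeWhile (fun d => !isSpaceB d) (c :: rest)
      let r := List.dropWhile (fun d => !isSpaceB d) (c :: rest)
      let j := i + w.length
      if (i : Int) ≤ pos ∧ pos < (j : Int) then some (String.mk w, (i : Int), (j : Int))
      else scanRuns pos r j
termination_by l _ => l.length
decreasing_by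
  · simp
  · simp [List.dropWhile, h]
    exact List.length_dropWhile_le _ _

def get_this_word_alt (text : String) (pos : Int) : Option (String × Int × Int) :=
  let cs := text.toList
  if cs.length = 0 ∨ pos ≥ (cs.length : Int) ∨ pos < 0 then none
  else if isSpaceB (cs.getD pos.toNat ' ') then none
  else scanRuns pos cs 0

-- ===== PRECONDITION & SPEC =====
def Spec_get_this_word (text : String) (pos : Int) (out : Option (String × Int × Int)) : Prop := out = get_this_word_alt text pos
instance (text : String) (pos : Int) (out : Option (String × Int × Int)) : Decidable (Spec_get_this_word text pos out) := by unfold Spec_get_this_word; infer_instance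

-- ===== CLAIM (what is proved, stated in full; the proofs are below) =====
def Claim_equal_get_this_word : Prop := ∀ (text : String) (pos : Int), Dom_get_this_word text pos → Spec_get_this_word text pos (get_this_word text pos)

-- ===== LEMMAS AND PROOFS =====

-- the word piece strictly left of p and the word piece at/right of p
def wordL (cs : List Char) (p : Nat) : List Char :=
  ((cs.take p).reverse.takeWhile (fun d => !isSpaceB d)).reverse

def wordR (cs : List Char) (p : Nat) : List Char :=
  (cs.drop p).takeWhile (fun d => !isSpaceB d)

theorem isSpaceA_eq : isSpaceA = isSpaceB := rfl

theorem takeWhile_all_append (q : Char → Bool) (l₁ l₂ : List Char) (h : ∀ x ∈ l₁, q x = true) :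
    (l₁ ++ l₂).takeWhile q = l₁ ++ l₂.takeWhile q := by
  induction l₁ with
  | nil => simp
  | cons a t ih =>
    simp only [List.cons_append, List.takeWhile_cons, h a (by simp)]
    rw [ih (fun x hx => h x (by simp [hx]))]
    simp

theorem takeWhile_dropWhile_nil (q : Char → Bool) (l : List Char) :
    (l.dropWhile q).takeWhile q = [] := by
  induction l with
  | nil => simp
  | cons a t ih =>
    by_cases ha : q a
    · simpa [List.dropWhile_cons, ha] using ih
    · simp [List.dropWhile_cons, ha, List.takeWhile_cons]

theorem mem_takeWhile_pred (q : Char → Bool) (l : List Char) (x : Char)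
    (hx : x ∈ l.takeWhile q) : q x = true := by
  induction l with
  | nil => simp at hx
  | cons a t ih =>
    rw [List.takeWhile_cons] at hx
    by_cases ha : q a
    · simp [ha] at hx
      rcases hx with h | h
      · exact h ▸ ha
      · exact ih h
    · simp [ha] at hx

theorem backScan_eq (cs : List Char) (i : Nat) (hi : i ≤ cs.length) (s : List Char) (sp : Nat) :
    backScan cs i s sp =
      ((wordL cs i) ++ s,
       if (wordL cs i).length = 0 then sp else i - (wordL cs i).length) := by
  induction i generalizing s sp with
  | zero => simp [backScan, wordL]
  | succ i ih =>
    have hlt : i < cs.length := Nat.lt_of_succ_le hi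
    have htake : cs.take (i+1) = cs.take i ++ [cs[i]] := by
      rw [List.take_add_one]; simp [List.getElem?_eq_getElem hlt]
    have hgetD : cs.getD i ' ' = cs[i] := List.getD_eq_getElem cs ' ' hlt
    have hun : backScan cs (i+1) s sp =
        if ¬ isSpaceA (cs.getD i ' ') then backScan cs i ((cs.getD i ' ') :: s) i
        else (s, sp) := rfl
    rw [hun, hgetD, isSpaceA_eq]
    by_cases hc : isSpaceB cs[i]
    · rw [if_neg (by simp [hc])]
      rw [wordL, htake, List.reverse_append]
      simp [List.takeWhile_cons, hc]
    · rw [if_pos (by simp [hc]), ih (Nat.le_of_lt hlt)]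
      have hw : wordL cs (i+1) = wordL cs i ++ [cs[i]] := by
        rw [wordL, htake, List.reverse_append]
        simp [List.takeWhile_cons, hc, wordL]
      rw [hw]
      refine congrArg₂ Prod.mk (by simp) ?_
      simp only [List.length_append, List.length_cons, List.length_nil]
      split_ifs <;> first | exact ‹False›.elim | omega

theorem fwdScan_eq (l s : List Char) :
    fwdScan l s = s ++ l.takeWhile (fun d => !isSpaceB d) := by
  induction l generalizing s with
  | nil => simp [fwdScan]
  | cons c rest ih =>
    by_cases hc : isSpaceB c
    · simp [fwdScan, isSpaceA_eq, hc, List.takeWhile_cons]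
    · simp [fwdScan, isSpaceA_eq, hc, List.takeWhile_cons, ih]

theorem boundary_eq (cs : List Char) (i : Nat) (hi : i ≤ cs.length)
    (h : i = 0 ∨ isSpaceB (cs.getD (i-1) ' ') = true) :
    (cs.take i).reverse.takeWhile (fun d => !isSpaceB d) = [] := by
  rcases h with h | h
  · simp [h]
  · rcases Nat.eq_zero_or_pos i with h0 | h0
    · simp [h0]
    · have hlt : i - 1 < cs.length := by omega
      obtain ⟨m, rfl⟩ : ∃ m, i = m + 1 := ⟨i - 1, by omega⟩
      simp only [Nat.add_sub_cancel] at h hlt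
      have htake : cs.take (m+1) = cs.take m ++ [cs[m]] := by
        rw [List.take_add_one]; simp [List.getElem?_eq_getElem hlt]
      rw [List.getD_eq_getElem cs ' ' hlt] at h
      rw [htake, List.reverse_append]
      simp [List.takeWhile_cons, h]

theorem scanRuns_eq (cs : List Char) (pos : Int) (p : Nat) (hpos : pos = (p : Int))
    (hplen : p < cs.length) (hpns : isSpaceB cs[p] = false) :
    ∀ k i, cs.length - i = k → i ≤ p →
      (i = 0 ∨ isSpaceB (cs.getD (i-1) ' ') = true ∨ isSpaceB (cs.getD i ' ') = true) →
      scanRuns pos (cs.drop i) i =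
        some (String.mk (wordL cs p ++ wordR cs p),
              ((p - (wordL cs p).length : Nat) : Int),
              ((p + (wordR cs p).length : Nat) : Int)) := by
  intro k
  induction k using Nat.strong_induction_on with
  | _ k ih =>
    intro i hk hip hinv
    have hilen : i < cs.length := lt_of_le_of_lt hip hplen
    have hdrop : cs.drop i = cs[i] :: cs.drop (i+1) := List.drop_eq_getElem_cons hilen
    rw [hdrop, scanRuns]
    by_cases hc : isSpaceB cs[i]
    · rw [dif_pos hc]
      have hipp : i < p := by
        rcases Nat.lt_or_ge i p with h | h
        · exact h
        · exfalso
          have hip2 : i = p := by omega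
          subst hip2
          rw [hpns] at hc
          exact absurd hc (by simp)
      exact ih (cs.length - (i+1)) (by omega) (i+1) rfl (by omega)
        (Or.inr (Or.inl (by
          simp only [Nat.add_sub_cancel]
          rw [List.getD_eq_getElem cs ' ' hilen]; exact hc)))
    · rw [dif_neg hc]
      rw [← hdrop]
      set q : Char → Bool := fun d => !isSpaceB d with hq
      set w := List.takeWhile q (cs.drop i) with hw
      set r := List.dropWhile q (cs.drop i) with hr
      have hsplit : w ++ r = cs.drop i := List.takeWhile_append_dropWhile
      have hw_all : ∀ x ∈ w, q x = true := fun x hx => mem_takeWhile_pred q _ x hx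
      have hw_cons : ∃ t, w = cs[i] :: t := by
        rw [hw, hdrop, List.takeWhile_cons, if_pos (by simp [hq, hc])]
        exact ⟨_, rfl⟩
      have hw_pos : 0 < w.length := by obtain ⟨t, ht⟩ := hw_cons; simp [ht]
      have hwlen_le : w.length ≤ cs.length - i := by
        have := (List.takeWhile_prefix q (l := cs.drop i)).length_le
        simpa using this
      by_cases hcond : (i : Int) ≤ pos ∧ pos < ((i + w.length : Nat) : Int)
      · rw [if_pos hcond]
        have hpj : p < i + w.length := by
          have := hcond.2; rw [hpos] at this; exact_mod_cast this
        -- seg = the part of the word strictly left of p, from i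
        set seg := w.take (p - i) with hseg
        have hseg_eq : (cs.drop i).take (p - i) = seg := by
          rw [← hsplit, List.take_append_of_le_length (by omega)]
        have hseg_all : ∀ x ∈ seg, q x = true := fun x hx =>
          hw_all x (List.take_subset _ _ hx)
        have htakep : cs.take p = cs.take i ++ seg := by
          have : p = i + (p - i) := by omega
          rw [this, List.take_add, hseg_eq]
        have hWL : wordL cs p = seg := by
          rw [wordL, htakep, List.reverse_append,
            takeWhile_all_append _ _ _ (by intro x hx; exact hseg_all x (by simpa using hx)),
            boundary_eq cs i (le_of_lt hilen) (by
              rcases hinv with h | h | h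
              · exact Or.inl h
              · exact Or.inr h
              · rw [List.getD_eq_getElem cs ' ' hilen] at h; exact absurd h hc)]
          simp
        have hdropp : cs.drop p = w.drop (p - i) ++ r := by
          have hpi : p = i + (p - i) := by omega
          rw [hpi, ← List.drop_drop, ← hsplit,
            List.drop_append_of_le_length (by omega)]
          have h2 : i + (p - i) - i = p - i := by omega
          rw [h2]
        have hWR : wordR cs p = w.drop (p - i) := by
          rw [wordR, hdropp,
            takeWhile_all_append _ _ _ (fun x hx => hw_all x (List.drop_subset _ _ hx)),
            hr, takeWhile_dropWhile_nil]
          simp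
        have hseg_len : seg.length = p - i := by
          rw [hseg, List.length_take]; omega
        refine congrArg some ?_
        refine congrArg₂ Prod.mk ?_ (congrArg₂ Prod.mk ?_ ?_)
        · rw [hWL, hWR]
          rw [hseg, List.take_append_drop]
        · rw [hWL, hseg_len]
          congr 1; omega
        · rw [hWR]
          have : p + (w.drop (p - i)).length = i + w.length := by
            rw [List.length_drop]; omega
          rw [this]
      · rw [if_neg hcond]
        have hjp : i + w.length ≤ p := by
          rcases Nat.lt_or_ge p (i + w.length) with h | h
          · exfalso; exact hcond ⟨by rw [hpos]; exact_mod_cast hip, by rw [hpos]; exact_mod_cast h⟩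
          · exact h
        set j := i + w.length with hj
        have hjlen : j < cs.length := lt_of_le_of_lt hjp hplen
        have hrj : r = cs.drop j := by
          rw [hj, ← List.drop_drop, ← hsplit, List.drop_left]
        have hrhead : isSpaceB cs[j] = true := by
          have hdj : cs.drop j = cs[j] :: cs.drop (j+1) := List.drop_eq_getElem_cons hjlen
          have : ¬ q cs[j] = true := by
            intro hqj
            have := List.dropWhile_eq_nil_iff (p := q) (l := cs.drop i)
            have hhead : r.head? = some cs[j] := by rw [hrj, hdj]; rfl
            have := List.head?_dropWhile_not q (cs.drop i)
            rw [← hr, hhead] at this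
            simp at this
            exact absurd hqj (by simp [this])
          simpa [hq] using this
        have := ih (cs.length - j) (by omega) j rfl hjp
          (Or.inr (Or.inr (by rw [List.getD_eq_getElem cs ' ' hjlen]; exact hrhead)))
        rw [hrj]
        exact this

-- ===== VERDICT (by name: the statement is the Claim_ definition above) =====
theorem get_this_word_spec : Claim_equal_get_this_word := by
  intro text pos _
  unfold Spec_get_this_word get_this_word get_this_word_alt
  set cs := text.toList with hcs
  by_cases hg : cs.length = 0 ∨ pos ≥ (cs.length : Int) ∨ pos < 0
  · simp only [hg, if_pos]
  · simp only [hg, if_neg, not_false_eq_true]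
    push_neg at hg
    obtain ⟨hne, hlt, hge⟩ := hg
    set p := pos.toNat with hp
    have hpos : pos = (p : Int) := (Int.toNat_of_nonneg hge).symm
    have hplen : p < cs.length := by omega
    have hgetD : cs.getD p ' ' = cs[p] := List.getD_eq_getElem cs ' ' hplen
    rw [isSpaceA_eq, hgetD]
    by_cases hsp : isSpaceB cs[p]
    · simp only [hsp, if_pos]
    · simp only [hsp, if_neg, Bool.false_eq_true, not_false_eq_true]
      have hpns : isSpaceB cs[p] = false := by simpa using hsp
      have hA := backScan_eq cs p (le_of_lt hplen) [] p
      have hF := fwdScan_eq (cs.drop p) (wordL cs p)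
      have hB := scanRuns_eq cs pos p hpos hplen hpns (cs.length - 0) 0 rfl (Nat.zero_le p)
        (Or.inl rfl)
      rw [List.drop_zero] at hB
      rw [hB, hA]
      simp only [List.append_nil] at hF ⊢
      rw [hF]
      have hWLle : (wordL cs p).length ≤ p := by
        have h1 := (List.takeWhile_prefix (fun d => !isSpaceB d)
          (l := (cs.take p).reverse)).length_le
        rw [wordL, List.length_reverse]
        refine le_trans h1 ?_
        simp [List.length_take]
      rw [show List.takeWhile (fun d => !isSpaceB d) (List.drop p cs) = wordR cs p from rfl]
      refine congrArg some ?_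
      refine congrArg₂ Prod.mk rfl (congrArg₂ Prod.mk ?_ ?_)
      · split_ifs with h0
        · simp [h0]
        · rfl
      · split_ifs with h0 <;>
          · simp only [List.length_append]
            push_cast [Nat.cast_sub hWLle]
            omega
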